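-- pv_equiv track=rewrite | github.com/JackDraak/003-TicTacToe | main.py | _generate_score_matrix
-- ===== SOURCE A (Python) =====
-- from typing import List
--
-- def _generate_score_matrix(grid_size) -> List[List[int]]:
--     '''
--     Generate a score matrix for the game board, where the score is the number of ways to win from that cell.
--     '''
--     assert grid_size % 2 == 1, "Grid size should be odd, comment-out this line if you feel otherwise (and good luck!)"
--     matrix = [[0 for _ in range(grid_size)] for _ in range(grid_size)]
--     for row in range(grid_size):
--         for col in range(grid_size):
--             score = 2
--             if row == col and (row == 0 or row == grid_size - 1 or row == grid_size // 2):
--                 score += 1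
--             if row + col == grid_size - 1 and (row == 0 or row == grid_size - 1 or row == grid_size // 2):
--                 score += 1
--             matrix[row][col] = score
--     return matrix
-- ===== SOURCE B (Python) =====
-- def _generate_score_matrix(grid_size):
--     '''
--     Generate a score matrix for the game board, where the score is the number of ways to win from that cell.
--     '''
--     assert grid_size % 2 == 1, "Grid size should be odd, comment-out this line if you feel otherwise (and good luck!)"
--     special = {0, grid_size - 1, grid_size // 2}
--     matrix = []
--     for r in range(grid_size):
--         row = [2] * grid_size
--         if r in special:
--             row[r] += 1
--             row[grid_size - 1 - r] += 1
--         matrix.append(row)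
--     return matrix
-- ===== Notes on version B (the rewrite author's own statement) =====
-- stated objective: simpler
-- what changed: instead of testing two diagonal conditions at every one of the n*n cells, B fills each row uniformly with 2s and, only for the three privileged row indices {0, n-1, n//2}, bumps the two diagonal cells of that row by point increments
-- outside the precondition, e.g. on _generate_score_matrix(2): A raises AssertionError, B raises AssertionError; on _generate_score_matrix(0): A raises AssertionError, B raises AssertionError
import Mathlib
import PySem

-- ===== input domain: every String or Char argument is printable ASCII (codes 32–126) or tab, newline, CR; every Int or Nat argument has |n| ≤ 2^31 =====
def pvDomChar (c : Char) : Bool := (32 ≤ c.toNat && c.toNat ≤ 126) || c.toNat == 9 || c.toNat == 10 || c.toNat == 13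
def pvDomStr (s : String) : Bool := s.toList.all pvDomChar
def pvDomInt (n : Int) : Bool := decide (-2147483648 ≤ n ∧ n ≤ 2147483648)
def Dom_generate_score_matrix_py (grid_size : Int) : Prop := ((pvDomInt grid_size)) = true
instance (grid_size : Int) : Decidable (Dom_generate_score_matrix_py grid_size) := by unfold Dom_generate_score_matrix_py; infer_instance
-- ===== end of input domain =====

-- B replaces A's per-cell conditional sweep by a uniform fill of 2s plus two targeted +1 updates
-- at each privileged row index {0, n-1, n//2} (objective: simpler; same final matrix).

-- ===== PORT A =====
-- matrix[row][col] = score  (exact for the in-range nonnegative indices Pre_ guarantees)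
def pySetCellA (m : List (List Int)) (row col v : Int) : List (List Int) :=
  PySem.List.pySetD m row (PySem.List.pySetD (PySem.List.pyGetD m row []) col v)

def generate_score_matrix_py (grid_size : Int) : List (List Int) :=
  let matrix := (PySem.List.pyRange 0 grid_size 1).map
    (fun _ => (PySem.List.pyRange 0 grid_size 1).map (fun _ => (0 : Int)))
  (PySem.List.pyRange 0 grid_size 1).foldl (fun m row =>
    (PySem.List.pyRange 0 grid_size 1).foldl (fun m col =>
      let score : Int := 2
      let score := if row = col ∧ (row = 0 ∨ row = grid_size - 1 ∨ row = PySem.Int.floordiv grid_size 2)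
                   then score + 1 else score
      let score := if row + col = grid_size - 1 ∧ (row = 0 ∨ row = grid_size - 1 ∨ row = PySem.Int.floordiv grid_size 2)
                   then score + 1 else score
      pySetCellA m row col score) m) matrix

-- ===== PORT B =====
def generate_score_matrix_py_alt (grid_size : Int) : List (List Int) :=
  let special := PySem.Set.ofList [0, grid_size - 1, PySem.Int.floordiv grid_size 2]
  (PySem.List.pyRange 0 grid_size 1).foldl (fun matrix r =>
    let row := PySem.List.pyRepeat [(2 : Int)] grid_size
    let row :=
      if PySem.Set.contains special r then
        let row := PySem.List.pySetD row r (PySem.List.pyGetD row r 0 + 1)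
        PySem.List.pySetD row (grid_size - 1 - r) (PySem.List.pyGetD row (grid_size - 1 - r) 0 + 1)
      else row
    matrix ++ [row]) []


-- ===== PRECONDITION & SPEC =====
-- Pre_ excludes exactly the even grid sizes, on which A's assert fails (AssertionError; B raises there too).
def Pre_generate_score_matrix_py (grid_size : Int) : Prop :=
  PySem.Int.mod grid_size 2 = 1
instance (grid_size : Int) : Decidable (Pre_generate_score_matrix_py grid_size) := by
  unfold Pre_generate_score_matrix_py; infer_instance

def pvWitness_generate_score_matrix_py : Int := 3

def Spec_generate_score_matrix_py (grid_size : Int) (out : List (List Int)) : Prop := out = generate_score_matrix_py_alt grid_size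
instance (grid_size : Int) (out : List (List Int)) : Decidable (Spec_generate_score_matrix_py grid_size out) := by unfold Spec_generate_score_matrix_py; infer_instance

-- ===== CLAIM (what is proved, stated in full; the proofs are below) =====
def Claim_equal_generate_score_matrix_py : Prop := ∀ (grid_size : Int), Dom_generate_score_matrix_py grid_size → Pre_generate_score_matrix_py grid_size → Spec_generate_score_matrix_py grid_size (generate_score_matrix_py grid_size)

-- ===== LEMMAS AND PROOFS =====

-- the per-cell score A computes
def pvScore (n r c : Int) : Int :=
  (if r + c = n - 1 ∧ (r = 0 ∨ r = n - 1 ∨ r = PySem.Int.floordiv n 2) then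
     (if r = c ∧ (r = 0 ∨ r = n - 1 ∨ r = PySem.Int.floordiv n 2) then (2:Int) + 1 else 2) + 1
   else (if r = c ∧ (r = 0 ∨ r = n - 1 ∨ r = PySem.Int.floordiv n 2) then (2:Int) + 1 else 2))

def pvSpec (d : Nat) : List (List Int) :=
  (List.range d).map (fun r : Nat => (List.range d).map (fun c : Nat => pvScore (d:Int) (r:Int) (c:Int)))


-- a fold over range m that sets index i to f i (current value at i) rewrites each cell once
-- a fold over range m that sets index i to f i (current value at i) rewrites each cell once
lemma pv_foldl_range_set {α : Type} (dflt : α) (f : Nat → α → α) (F : List α → Nat → List α)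
    (hF : ∀ (l : List α) (i : Nat), i < l.length → F l i = l.set i (f i (l.getD i dflt))) :
    ∀ (m : Nat) (l : List α), m ≤ l.length →
      (List.range m).foldl F l = (List.range m).map (fun i => f i (l.getD i dflt)) ++ l.drop m := by
  intro m
  induction m with
  | zero => intro l _; simp
  | succ m ih =>
    intro l hm
    have hm' : m < l.length := by omega
    rw [List.range_succ, List.foldl_append, List.map_append, ih l (by omega)]
    have hlen : ((List.range m).map (fun i => f i (l.getD i dflt))).length = m := by simp
    have hdrop : l.drop m = l[m] :: l.drop (m + 1) := List.drop_eq_getElem_cons hm'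
    have hgetD : ((List.range m).map (fun i => f i (l.getD i dflt)) ++ l.drop m).getD m dflt
        = l.getD m dflt := by
      rw [List.getD_eq_getElem?_getD, List.getElem?_append_right (by omega), hlen, Nat.sub_self,
        hdrop]
      simp [List.getD_eq_getElem?_getD, List.getElem?_eq_getElem hm']
    have hflen : m < ((List.range m).map (fun i => f i (l.getD i dflt)) ++ l.drop m).length := by
      simp; omega
    rw [List.foldl_cons, List.foldl_nil, hF _ m hflen, hgetD,
      List.set_append_right _ _ (by omega), hlen, Nat.sub_self, hdrop, List.set_cons_zero]
    simp

-- a fold that repeatedly reads and writes one fixed index r is a fold on that cell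
lemma pv_foldl_set_fixed {α : Type} (dflt : α) (r : Nat) (g : α → Nat → α) :
    ∀ (cols : List Nat) (m : List α), r < m.length →
      cols.foldl (fun acc c => acc.set r (g (acc.getD r dflt) c)) m
      = m.set r (cols.foldl g (m.getD r dflt)) := by
  intro cols
  induction cols with
  | nil =>
    intro m hr
    simp [List.getD_eq_getElem?_getD, List.getElem?_eq_getElem hr]
  | cons c cols ih =>
    intro m hr
    rw [List.foldl_cons, ih _ (by simpa using hr), List.set_set, List.foldl_cons]
    congr 1
    simp [List.getD_eq_getElem?_getD, hr, List.getElem_set_self]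

lemma pv_A_char (d : Nat) : generate_score_matrix_py (d : Int) = pvSpec d := by
  have hrange : PySem.List.pyRange 0 (d:Int) 1 = (List.range d).map (fun k => ((k : Nat) : Int)) := by
    rw [PySem.List.pyRange_one]; simp
  unfold generate_score_matrix_py
  simp only [hrange, List.foldl_map, List.map_map, Function.comp_def]
  rw [pv_foldl_range_set ([] : List Int)
    (fun r cur => (List.range d).foldl (fun cur' c => cur'.set c (pvScore d r c)) cur) _
    ?hF d _ (by simp)]
  case hF =>
    intro l i hi
    simp only [pySetCellA, PySem.List.pySetD_natCast, PySem.List.pyGetD_natCast]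
    exact pv_foldl_set_fixed [] i (fun cur c => cur.set c (pvScore d i c)) (List.range d) l hi
  · have hdrop : ((List.range d).map (fun _ => (List.range d).map (fun _ => (0:Int)))).drop d = [] := by
      simp
    rw [hdrop, List.append_nil]
    unfold pvSpec
    apply List.map_congr_left
    intro r hr
    have hget : ((List.range d).map (fun _ => (List.range d).map (fun _ => (0:Int)))).getD r []
        = (List.range d).map (fun _ => (0:Int)) := by
      simp only [List.getD_eq_getElem?_getD, List.getElem?_map, List.getElem?_range (List.mem_range.mp hr)]
      rfl
    rw [hget, pv_foldl_range_set (0 : Int) (fun i _ => pvScore (d:Int) (r:Int) (i:Int))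
      (fun l i => l.set i (pvScore (d:Int) (r:Int) (i:Int))) (fun l i _ => rfl) d _ (by simp)]
    simp

def pvRow (row : List Int) (i j : Nat) : List Int :=
  let v := row.set i (row.getD i 0 + 1)
  v.set j (v.getD j 0 + 1)

lemma pv_row_priv (d r : Nat) (hd3 : 3 ≤ d) (hodd : d % 2 = 1) (hr : r < d)
    (hpriv : r = 0 ∨ r = d - 1 ∨ r = d / 2) :
    pvRow (List.replicate d (2:Int)) r (d - 1 - r)
      = (List.range d).map (fun c : Nat => pvScore (d:Int) (r:Int) (c:Int)) := by
  have hq : PySem.Int.floordiv (d:Int) 2 = ((d / 2 : Nat) : Int) := by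
    have := PySem.Int.floordiv_natCast d 2; exact_mod_cast this
  apply List.ext_getElem (by simp [pvRow])
  intro c hc hc'
  have hcd : c < d := by simpa using hc'
  simp only [pvRow, List.getElem_set, List.getElem_map, List.getElem_range,
    List.getD_eq_getElem?_getD, List.getElem?_set, List.getElem?_replicate,
    List.getElem_replicate, List.length_replicate, pvScore, hq]
  split_ifs <;> (try simp only [Option.getD_some]) <;> omega

lemma pv_row_plain (d r : Nat) (hr : r < d) (hnpriv : ¬(r = 0 ∨ r = d - 1 ∨ r = d / 2)) :
    List.replicate d (2:Int)
      = (List.range d).map (fun c : Nat => pvScore (d:Int) (r:Int) (c:Int)) := by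
  have hq : PySem.Int.floordiv (d:Int) 2 = ((d / 2 : Nat) : Int) := by
    have := PySem.Int.floordiv_natCast d 2; exact_mod_cast this
  apply List.ext_getElem (by simp)
  intro c hc hc'
  have hcd : c < d := by simpa using hc'
  simp only [List.getElem_replicate, List.getElem_map, List.getElem_range, pvScore, hq]
  split_ifs <;> omega

lemma pv_B_char (d : Nat) (hd3 : 3 ≤ d) (hodd : d % 2 = 1) :
    generate_score_matrix_py_alt (d : Int) = pvSpec d := by
  have hrange : PySem.List.pyRange 0 (d:Int) 1 = (List.range d).map (fun k => ((k : Nat) : Int)) := by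
    rw [PySem.List.pyRange_one]; simp
  have hq : PySem.Int.floordiv (d:Int) 2 = ((d / 2 : Nat) : Int) := by
    have := PySem.Int.floordiv_natCast d 2; exact_mod_cast this
  have e0 : (0 : Int) = ((0 : Nat) : Int) := by norm_num
  have e1 : (d : Int) - 1 = ((d - 1 : Nat) : Int) := by omega
  have hset : PySem.Set.ofList [(0:Int), (d:Int) - 1, PySem.Int.floordiv (d:Int) 2]
      = [((0:Nat):Int), ((d-1:Nat):Int), ((d/2:Nat):Int)] := by
    rw [hq, e0, e1]
    have n1 : d - 1 ≠ 0 := by omega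
    have n2 : d / 2 ≠ 0 := by omega
    have n3 : d / 2 ≠ d - 1 := by omega
    simp [PySem.Set.ofList_eq_foldl, PySem.Set.add, n1]
    omega
  unfold generate_score_matrix_py_alt
  simp only [hset, hrange, List.foldl_map, PySem.List.pyRepeat_singleton, Int.toNat_natCast]
  rw [PySem.List.foldl_append_singleton_eq_map]
  rw [List.nil_append]
  unfold pvSpec
  apply List.map_congr_left
  intro r hrm
  have hrd : r < d := List.mem_range.mp hrm
  by_cases hp : r = 0 ∨ r = d - 1 ∨ r = d / 2
  · have hc : PySem.Set.contains [((0:Nat):Int), ((d-1:Nat):Int), ((d/2:Nat):Int)] ((r:Nat):Int) = true := by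
      simp [PySem.Set.contains]; omega
    rw [hc, if_pos rfl]
    rw [show (d:Int) - 1 - ((r:Nat):Int) = ((d - 1 - r : Nat) : Int) from by omega]
    simp only [PySem.List.pySetD_natCast, PySem.List.pyGetD_natCast]
    exact pv_row_priv d r hd3 hodd hrd hp
  · have hc : PySem.Set.contains [((0:Nat):Int), ((d-1:Nat):Int), ((d/2:Nat):Int)] ((r:Nat):Int) = false := by
      simp [PySem.Set.contains]; omega
    rw [hc]
    simp only [if_neg Bool.false_ne_true]
    exact pv_row_plain d r hrd hp

-- ===== VERDICT (by name: the statement is the Claim_ definition above) =====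
theorem generate_score_matrix_py_spec : Claim_equal_generate_score_matrix_py := by
  intro n _ hpre
  unfold Spec_generate_score_matrix_py
  unfold Pre_generate_score_matrix_py at hpre
  have hmod : n % 2 = 1 := by
    rw [← PySem.Int.mod_eq_emod_of_pos (a := n) (by omega : (0:Int) < 2)]; exact hpre
  by_cases hneg : n ≤ 0
  · have hnil : PySem.List.pyRange 0 n 1 = [] := PySem.List.pyRange_one_eq_nil (by omega)
    simp [generate_score_matrix_py, generate_score_matrix_py_alt, hnil]
  · obtain ⟨d, hd⟩ : ∃ d : Nat, n = (d : Int) := ⟨n.toNat, by omega⟩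
    subst hd
    by_cases hone : d = 1
    · subst hone; decide
    · have hd3 : 3 ≤ d := by omega
      have hodd : d % 2 = 1 := by omega
      rw [pv_A_char d, pv_B_char d hd3 hodd]
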